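-- pv_equiv track=rewrite | github.com/mtc-jordan/ai-ceo-saas-platform | apps/api-gateway/app/services/document_service.py | highlight_matches
-- ===== SOURCE A (Python) =====
-- from typing import Optional, List, Dict, Any
--
-- def highlight_matches(content: str, query: str, context_length: int = 100) -> List[str]:
--     """Extract snippets with highlighted matches"""
--     snippets = []
--     query_lower = query.lower()
--     content_lower = content.lower()
--
--     start = 0
--     while True:
--         pos = content_lower.find(query_lower, start)
--         if pos == -1:
--             break
--
--         snippet_start = max(0, pos - context_length)
--         snippet_end = min(len(content), pos + len(query) + context_length)
--
--         snippet = content[snippet_start:snippet_end]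
--         if snippet_start > 0:
--             snippet = "..." + snippet
--         if snippet_end < len(content):
--             snippet = snippet + "..."
--
--         snippets.append(snippet)
--         start = pos + 1
--
--         if len(snippets) >= 3:
--             break
--
--     return snippets
-- ===== SOURCE B (Python) =====
-- def highlight_matches(content: str, query: str, context_length: int = 100):
--     """Alternative: exhaustive index scan for matches (first 3), then a separate rendering pass."""
--     content_lower = content.lower()
--     query_lower = query.lower()
--     n = len(content)
--     m = len(query)
--     positions = [i for i in range(n - m + 1)
--                  if content_lower[i:i + m] == query_lower][:3]
--     return [_snippet(content, n, m, pos, context_length) for pos in positions]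
--
--
-- def _snippet(content, n, m, pos, context_length):
--     start = max(0, pos - context_length)
--     end = min(n, pos + m + context_length)
--     snippet = content[start:end]
--     if start > 0:
--         snippet = "..." + snippet
--     if end < n:
--         snippet = snippet + "..."
--     return snippet
-- ===== Notes on version B (the rewrite author's own statement) =====
-- stated objective: alternative
-- what changed: B replaces A's stateful while-loop around str.find (restart at pos+1, break at 3) by an exhaustive index scan that builds the list of the first 3 match positions with a slice-comparison comprehension, then renders snippets in a separate pass via a helper.
import Mathlib
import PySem

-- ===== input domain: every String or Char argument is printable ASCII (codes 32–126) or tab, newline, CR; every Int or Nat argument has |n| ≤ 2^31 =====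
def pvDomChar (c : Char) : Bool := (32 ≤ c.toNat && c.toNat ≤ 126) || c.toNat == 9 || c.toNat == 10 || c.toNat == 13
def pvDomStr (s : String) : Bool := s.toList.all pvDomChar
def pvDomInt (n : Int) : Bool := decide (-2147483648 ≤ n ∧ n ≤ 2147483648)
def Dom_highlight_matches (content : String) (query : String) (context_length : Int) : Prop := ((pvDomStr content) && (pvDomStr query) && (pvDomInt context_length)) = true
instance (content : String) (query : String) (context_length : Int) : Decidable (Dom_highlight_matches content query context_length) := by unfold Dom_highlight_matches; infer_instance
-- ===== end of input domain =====

-- B replaces A's stateful while-loop around str.find by an exhaustive index scan collecting the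
-- first 3 match positions, followed by a separate snippet-rendering pass (alternative, same cost).

-- ===== PORT A =====
-- the 'while True' loop of A: it appends one snippet per iteration and breaks at 3 snippets,
-- so 3 units of fuel are exactly enough; the ≥ 3 break is kept literally.
def hmLoopA (content cl ql : List Char) (qlen ctx : Int) :
    Nat → Int → List String → List String
  | 0, _, snippets => snippets
  | fuel + 1, start, snippets =>
    let pos := PySem.Chars.findFrom cl ql start
    if pos = -1 then snippets
    else
      let snippet_start := max 0 (pos - ctx)
      let snippet_end := min (PySem.List.len content) (pos + qlen + ctx)
      let snippet := PySem.List.slice content (some snippet_start) (some snippet_end)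
      let snippet := if 0 < snippet_start then "...".toList ++ snippet else snippet
      let snippet := if snippet_end < PySem.List.len content then snippet ++ "...".toList else snippet
      let snippets' := snippets ++ [String.ofList snippet]
      if 3 ≤ snippets'.length then snippets'
      else hmLoopA content cl ql qlen ctx fuel (pos + 1) snippets'

def highlight_matches (content : String) (query : String) (context_length : Int) : List String :=
  hmLoopA content.toList (PySem.Chars.lower content.toList) (PySem.Chars.lower query.toList)
    (PySem.List.len query.toList) context_length 3 0 []

-- ===== PORT B =====
-- Source B's helper _snippet(content, n, m, pos, context_length)
def hmSnippet (content : List Char) (n m pos ctx : Int) : String :=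
  let s := max 0 (pos - ctx)
  let e := min n (pos + m + ctx)
  let snippet := PySem.List.slice content (some s) (some e)
  let snippet := if 0 < s then "...".toList ++ snippet else snippet
  let snippet := if e < n then snippet ++ "...".toList else snippet
  String.ofList snippet

def highlight_matches_alt (content : String) (query : String) (context_length : Int) : List String :=
  let c := content.toList
  let cl := PySem.Chars.lower c
  let ql := PySem.Chars.lower query.toList
  let n := PySem.List.len c
  let m := PySem.List.len query.toList
  let positions :=
    ((PySem.List.pyRange 0 (n - m + 1) 1).filter
      (fun i => PySem.List.slice cl (some i) (some (i + m)) == ql)).take 3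
  positions.map (fun pos => hmSnippet c n m pos context_length)

-- ===== PRECONDITION & SPEC =====
def Spec_highlight_matches (content : String) (query : String) (context_length : Int) (out : List String) : Prop := out = highlight_matches_alt content query context_length
instance (content : String) (query : String) (context_length : Int) (out : List String) : Decidable (Spec_highlight_matches content query context_length out) := by unfold Spec_highlight_matches; infer_instance

-- ===== CLAIM (what is proved, stated in full; the proofs are below) =====
def Claim_equal_highlight_matches : Prop := ∀ (content : String) (query : String) (context_length : Int), Dom_highlight_matches content query context_length → Spec_highlight_matches content query context_length (highlight_matches content query context_length)

-- ===== LEMMAS AND PROOFS =====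

-- indices at which ql matches inside cl (Python's overlapping matches)
def hmIdx (cl ql : List Char) : List Nat :=
  (List.range (cl.length + 1)).filter (fun i => ql.isPrefixOf (cl.drop i))

lemma hm_go_spec (sub : List Char) :
    ∀ (l : List Char) (k : Nat),
      PySem.Chars.find.go sub l k =
        match ((List.range (l.length + 1)).filter (fun i => sub.isPrefixOf (l.drop i))).head? with
        | some i => (k : Int) + i
        | none => -1 := by
  intro l
  induction l with
  | nil =>
    intro k
    have h : sub.isPrefixOf ([] : List Char) = sub.isEmpty := by cases sub <;> rfl
    cases hE : sub.isEmpty with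
    | true => simp [PySem.Chars.find.go, List.range_one, h, hE]
    | false => simp [PySem.Chars.find.go, List.range_one, h, hE]
  | cons a t ih =>
    intro k
    rw [show (a :: t).length + 1 = (t.length + 1) + 1 from rfl, List.range_succ_eq_map]
    by_cases hp : sub.isPrefixOf (a :: t)
    · simp [PySem.Chars.find.go, hp]
    · have hstep : PySem.Chars.find.go sub (a :: t) k = PySem.Chars.find.go sub t (k + 1) := by
        simp [PySem.Chars.find.go, hp]
      rw [hstep, ih (k + 1)]
      simp only [List.filter_cons, List.drop_zero, hp, Bool.false_eq_true, if_false,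
        List.filter_map]
      have hc : (fun i => sub.isPrefixOf (List.drop i (a :: t))) ∘ Nat.succ =
          fun i => sub.isPrefixOf (List.drop i t) := by
        funext i; rfl
      rw [hc, List.head?_map]
      cases hH : ((List.range (t.length + 1)).filter (fun i => sub.isPrefixOf (List.drop i t))).head? with
      | none => rfl
      | some i =>
        simp only [Option.map_some]
        push_cast
        ring

lemma hm_prefix_false (cl ql : List Char) (i : Nat) (hi : i ≤ cl.length)
    (h : cl.length < i + ql.length) : ql.isPrefixOf (cl.drop i) = false := by
  cases hb : ql.isPrefixOf (cl.drop i) with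
  | false => rfl
  | true =>
    exfalso
    have hp : ql <+: cl.drop i := List.isPrefixOf_iff_prefix.mp hb
    have hle := hp.length_le
    rw [List.length_drop] at hle
    omega

lemma hm_idx_eq (cl ql : List Char) :
    hmIdx cl ql = (List.range (cl.length + 1 - ql.length)).filter (fun i => ql.isPrefixOf (cl.drop i)) := by
  unfold hmIdx
  have hr : List.range (cl.length + 1) = List.range (cl.length + 1 - ql.length) ++
      (List.range (cl.length + 1 - (cl.length + 1 - ql.length))).map
        (fun i => cl.length + 1 - ql.length + i) := by
    rw [← List.range_add]
    congr 1
    omega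
  have h2 : ((List.range (cl.length + 1 - (cl.length + 1 - ql.length))).map
      (fun i => cl.length + 1 - ql.length + i)).filter (fun i => ql.isPrefixOf (cl.drop i)) = [] := by
    rw [List.filter_eq_nil_iff]
    intro x hx
    simp only [List.mem_map, List.mem_range] at hx
    obtain ⟨j, hj, rfl⟩ := hx
    rw [hm_prefix_false cl ql _ (by omega) (by omega)]
    simp
  rw [hr, List.filter_append, h2, List.append_nil]

lemma hm_shift (P : Nat → Bool) (n s : Nat) (hs : s ≤ n) :
    ((List.range (n + 1)).filter P).filter (fun i => decide (s ≤ i)) =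
      ((List.range (n - s + 1)).filter (fun j => P (s + j))).map (fun j => s + j) := by
  rw [List.filter_filter]
  have hr : List.range (n + 1) = List.range s ++ (List.range (n - s + 1)).map (fun i => s + i) := by
    rw [← List.range_add]
    congr 1
    omega
  rw [hr, List.filter_append, List.filter_map]
  have h1 : (List.range s).filter (fun a => decide (s ≤ a) && P a) = [] := by
    rw [List.filter_eq_nil_iff]
    intro x hx
    simp only [List.mem_range] at hx
    simp [Nat.not_le.mpr hx]
  rw [h1, List.nil_append]
  congr 1
  apply List.filter_congr
  intro j _
  simp [Function.comp]

lemma hm_findFrom_spec (cl ql : List Char) (s : Nat) :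
    PySem.Chars.findFrom cl ql (s : Int) none =
      match ((hmIdx cl ql).filter (fun i => decide (s ≤ i))).head? with
      | some p => (p : Int)
      | none => -1 := by
  have hst : ¬ ((s : Int) < 0) := by omega
  by_cases hn : cl.length < s
  · have hfil : (hmIdx cl ql).filter (fun i => decide (s ≤ i)) = [] := by
      rw [List.filter_eq_nil_iff]
      intro x hx
      have hx2 : x ∈ List.range (cl.length + 1) := List.mem_of_mem_filter hx
      simp only [List.mem_range] at hx2
      simp
      omega
    rw [hfil]
    have hcond : ((cl.length : Int) < (s : Int)) := by omega
    simp only [PySem.Chars.findFrom]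
    simp only [if_neg hst]
    rw [if_pos hcond]
    rfl
  · rw [Nat.not_lt] at hn
    have hcond : ¬ ((cl.length : Int) < (s : Int)) := by omega
    simp only [PySem.Chars.findFrom]
    simp only [if_neg hst]
    rw [if_neg hcond, Int.toNat_natCast, Int.toNat_natCast, List.take_length]
    rw [PySem.Chars.find, hm_go_spec]
    have hdl : (List.drop s cl).length = cl.length - s := List.length_drop ..
    have hdd : (fun i => ql.isPrefixOf (List.drop i (List.drop s cl))) =
        fun i => ql.isPrefixOf (List.drop (s + i) cl) := by
      funext i
      simp only [List.drop_drop]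
    rw [hdl, hdd]
    unfold hmIdx
    rw [hm_shift _ _ _ hn, List.head?_map]
    cases hH : ((List.range (cl.length - s + 1)).filter
        (fun j => ql.isPrefixOf (List.drop (s + j) cl))).head? with
    | none => rfl
    | some j =>
      show (if ((0 : Nat) : Int) + (j : Int) = -1 then (-1 : Int)
            else (s : Int) + (((0 : Nat) : Int) + (j : Int))) = ((s + j : Nat) : Int)
      rw [if_neg (by push_cast; omega)]
      push_cast
      ring

lemma hm_idx_pairwise (cl ql : List Char) : (hmIdx cl ql).Pairwise (· < ·) :=
  List.pairwise_lt_range.filter _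

lemma hm_filter_tail (L : List Nat) (hL : L.Pairwise (· < ·)) :
    ∀ (s p : Nat) (t : List Nat), L.filter (fun i => decide (s ≤ i)) = p :: t →
      t = L.filter (fun i => decide (p + 1 ≤ i)) := by
  induction L with
  | nil => intro s p t h; simp at h
  | cons a r ih =>
    intro s p t h
    have har : ∀ x ∈ r, a < x := fun x hx => (List.pairwise_cons.mp hL).1 x hx
    have hr : r.Pairwise (· < ·) := (List.pairwise_cons.mp hL).2
    by_cases hsa : s ≤ a
    · rw [List.filter_cons, if_pos (by simpa using hsa)] at h
      injection h with h1 h2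
      subst h1
      rw [List.filter_cons, if_neg (by simp)]
      rw [← h2]
      apply List.filter_congr
      intro x hx
      have hax := har x hx
      simp only [decide_eq_decide]
      omega
    · rw [List.filter_cons, if_neg (by simpa using hsa)] at h
      have hmem : p ∈ r := by
        have hpmem : p ∈ r.filter (fun i => decide (s ≤ i)) := by
          rw [h]; exact List.mem_cons_self ..
        exact List.mem_of_mem_filter hpmem
      rw [List.filter_cons, if_neg (by simpa using Nat.not_le.mpr (Nat.lt_succ_of_lt (har p hmem)))]
      exact ih hr s p t h

lemma hm_loopA_eq (c cl ql : List Char) (qlen ctx : Int) :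
    ∀ (fuel : Nat) (s : Nat) (acc : List String), acc.length + fuel = 3 →
      hmLoopA c cl ql qlen ctx fuel (s : Int) acc =
        acc ++ (((hmIdx cl ql).filter (fun i => decide (s ≤ i))).take fuel).map
          (fun (p : Nat) => hmSnippet c (PySem.List.len c) qlen ((p : Nat) : Int) ctx) := by
  intro fuel
  induction fuel with
  | zero => intro s acc _; simp [hmLoopA]
  | succ fuel ih =>
    intro s acc hlen
    rw [hmLoopA]
    cases hH : ((hmIdx cl ql).filter (fun i => decide (s ≤ i))).head? with
    | none =>
      have hnil := List.head?_eq_none_iff.mp hH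
      have hpos : PySem.Chars.findFrom cl ql ((s : Nat) : Int) none = -1 := by
        rw [hm_findFrom_spec, hH]
      rw [hpos]
      simp [hnil]
    | some p =>
      obtain ⟨t, ht⟩ := List.head?_eq_some_iff.mp hH
      have hpos : PySem.Chars.findFrom cl ql ((s : Nat) : Int) none = (p : Int) := by
        rw [hm_findFrom_spec, hH]
      have htail : t = (hmIdx cl ql).filter (fun i => decide (p + 1 ≤ i)) :=
        hm_filter_tail _ (hm_idx_pairwise cl ql) s p t ht
      rw [hpos, ht]
      rw [if_neg (by omega)]
      by_cases hf : fuel = 0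
      · subst hf
        rw [if_pos (by simp; omega)]
        rfl
      · rw [if_neg (by simp; omega)]
        rw [show ((p : Int) + 1) = (((p + 1 : Nat) : Int)) by push_cast; ring]
        rw [ih (p + 1)]
        · rw [← htail, List.take_succ_cons, List.map_cons]
          simp only [List.append_assoc, List.singleton_append]
          rfl
        · simp only [List.length_append, List.length_cons, List.length_nil]
          omega

lemma hm_pyRange_zero (b : Int) :
    PySem.List.pyRange 0 b 1 = (List.range b.toNat).map (fun (k : Nat) => ((k : Nat) : Int)) := by
  simp only [PySem.List.pyRange]
  rw [if_neg (by norm_num), if_pos (by norm_num)]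
  by_cases hb : (0 : Int) < b
  · rw [if_pos hb]
    have h1 : b - 0 + 1 - 1 = b := by ring
    rw [h1, Int.ediv_one]
    apply List.map_congr_left
    intro x _
    ring
  · rw [if_neg hb]
    have h0 : b.toNat = 0 := by omega
    rw [h0]
    rfl

lemma hm_pred_eq (cl ql : List Char) (k : Nat) :
    (PySem.List.slice cl (some (k : Int)) (some ((k : Int) + (ql.length : Int))) == ql) =
      ql.isPrefixOf (cl.drop k) := by
  rw [PySem.List.slice_natCast_add]
  rw [Bool.eq_iff_iff]
  simp only [beq_iff_eq, List.isPrefixOf_iff_prefix, List.prefix_iff_eq_take]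
  constructor
  · intro h; exact h.symm
  · intro h; exact h.symm

-- ===== VERDICT (by name: the statement is the Claim_ definition above) =====
theorem highlight_matches_spec : Claim_equal_highlight_matches := by
  intro content query context_length _
  unfold Spec_highlight_matches
  simp only [highlight_matches, highlight_matches_alt]
  have hA := hm_loopA_eq content.toList (PySem.Chars.lower content.toList)
    (PySem.Chars.lower query.toList) (PySem.List.len query.toList) context_length 3 0 [] (by simp)
  simp only [Nat.cast_zero] at hA
  rw [hA, List.nil_append]
  set c := content.toList with hc
  set q := query.toList with hq
  set cl := PySem.Chars.lower c with hcl
  set ql := PySem.Chars.lower q with hql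
  have hclen : cl.length = c.length := by rw [hcl]; simp [PySem.Chars.lower]
  have hqlen : ql.length = q.length := by rw [hql]; simp [PySem.Chars.lower]
  have hfun : (fun i : Nat => decide (0 ≤ i)) = fun _ => true := by
    funext i; simp
  rw [hfun, List.filter_true]
  have hmq : PySem.List.len q = ((ql.length : Nat) : Int) := by
    rw [hqlen]; simp [PySem.List.len]
  have hnc : PySem.List.len c = ((c.length : Nat) : Int) := by simp [PySem.List.len]
  rw [hmq, hnc, hm_pyRange_zero]
  rw [show ((c.length : Int) - (ql.length : Int) + 1).toNat = cl.length + 1 - ql.length from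
    by rw [hclen]; omega]
  rw [List.filter_map]
  have hcongr : (List.range (cl.length + 1 - ql.length)).filter
      ((fun i => PySem.List.slice cl (some i) (some (i + (ql.length : Int))) == ql) ∘
        (fun (k : Nat) => ((k : Nat) : Int))) =
      (List.range (cl.length + 1 - ql.length)).filter (fun i => ql.isPrefixOf (cl.drop i)) :=
    List.filter_congr (fun k _ => hm_pred_eq cl ql k)
  rw [hcongr]
  rw [← hm_idx_eq]
  rw [← List.map_take, List.map_map]
  rfl
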